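-- pv_equiv track=rewrite | github.com/sonyaallin/eecs4401 | assignments/assignment-resources/more-resources/2023/Self-Assessments/Assignment2/wozniak6/funpuzz_csp.py | gen_subtraction_perms
-- ===== SOURCE A (Python) =====
-- def gen_subtraction_perms(dom_list, target):
--     sat_lst = []
--     perms = rec_helper(dom_list)
--     for p in perms:
--         i = 0
--         sat_flag = False
--         while i < len(p) and not sat_flag:
--             if p[i] - (sum(p) - p[i]) == target:
--                 sat_lst.append(p)
--                 sat_flag = True
--             i += 1
--     return sat_lst
--
-- def rec_helper(dom_list):
--     perm_list = []
--     if len(dom_list) > 1: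
--         rest = rec_helper(dom_list[1:])
--         for i in dom_list[0]:
--             perm = []
--             perm.append(i)
--             for r in rest:
--                 whole_p = perm + r
--                 perm_list.append(whole_p)
--     else:
--         for i in dom_list[0]:
--             perm = []
--             perm.append(i)
--             perm_list.append(perm)
--
--     return perm_list
-- ===== SOURCE B (Python) =====
-- def _hits(p, target):
--     s = sum(p)
--     return any(2 * x - s == target for x in p)
--
-- def gen_subtraction_perms(dom_list, target):
--     # Build the Cartesian product iteratively (left fold), then filter each
--     # tuple with its sum computed once: p[i] - (sum(p) - p[i]) == target
--     # is equivalent to 2*p[i] - sum(p) == target.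
--     prods = [[]]
--     for dom in dom_list:
--         prods = [p + [v] for p in prods for v in dom]
--     return [p for p in prods if _hits(p, target)]
-- ===== Notes on version B (the rewrite author's own statement) =====
-- stated objective: faster
-- what changed: B replaces A's recursive product builder and per-index while loop that recomputes sum(p) at every position with an iterative left-fold product and a single-pass filter using sum(p) computed once per tuple (2*x - s == target).
-- outside the precondition, e.g. on gen_subtraction_perms([], 0): A raises IndexError, B returns []
import Mathlib
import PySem

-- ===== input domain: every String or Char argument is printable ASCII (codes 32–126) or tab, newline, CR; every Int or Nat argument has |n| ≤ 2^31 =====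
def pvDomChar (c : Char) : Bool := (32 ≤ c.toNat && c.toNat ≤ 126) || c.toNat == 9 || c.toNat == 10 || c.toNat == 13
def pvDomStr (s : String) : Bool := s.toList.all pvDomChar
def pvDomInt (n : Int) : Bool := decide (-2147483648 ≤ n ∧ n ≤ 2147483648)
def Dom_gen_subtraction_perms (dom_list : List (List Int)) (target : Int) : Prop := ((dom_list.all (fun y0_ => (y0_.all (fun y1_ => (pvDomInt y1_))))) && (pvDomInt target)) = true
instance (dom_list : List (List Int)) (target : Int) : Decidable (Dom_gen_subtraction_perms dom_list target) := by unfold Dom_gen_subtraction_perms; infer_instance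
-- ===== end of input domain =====

-- B builds the Cartesian product with an iterative left fold and filters each tuple
-- in one pass using its sum computed once (2*x - s == target); faster than A's
-- per-index loop that recomputes sum(p) at every position.


-- ===== PORT A =====
-- rec_helper from A: recursion on dom_list; the [] case is where Python's
-- dom_list[0] raises IndexError (excluded by Pre_).
def pvRecHelper : List (List Int) → List (List Int)
  | [] => []
  | [d] => d.foldl (fun acc i => acc ++ [[i]]) []
  | d :: rest =>
      let r := pvRecHelper rest
      d.foldl (fun acc i => r.foldl (fun acc2 rr => acc2 ++ [i :: rr]) acc) []

-- A's inner while loop over the suffix q of p; sum(p) is recomputed each step as in Python.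
def pvWhileA (p : List Int) (t : Int) : List Int → Bool
  | [] => false
  | x :: xs => if x - (p.sum - x) == t then true else pvWhileA p t xs

def gen_subtraction_perms (dom_list : List (List Int)) (target : Int) : List (List Int) :=
  (pvRecHelper dom_list).foldl
    (fun acc p => if pvWhileA p target p then acc ++ [p] else acc) []

-- ===== PORT B =====
def pvHits (p : List Int) (t : Int) : Bool :=
  let s := p.sum
  p.any (fun x => 2 * x - s == t)

def gen_subtraction_perms_alt (dom_list : List (List Int)) (target : Int) : List (List Int) :=
  (dom_list.foldl (fun prods dom => prods.flatMap (fun p => dom.map (fun v => p ++ [v]))) [[]]).filter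
    (fun p => pvHits p target)

-- ===== PRECONDITION & SPEC =====
-- A's rec_helper evaluates dom_list[0] and raises IndexError on an empty dom_list.
def Pre_gen_subtraction_perms (dom_list : List (List Int)) (target : Int) : Prop := dom_list ≠ []
instance (dom_list : List (List Int)) (target : Int) : Decidable (Pre_gen_subtraction_perms dom_list target) := by unfold Pre_gen_subtraction_perms; infer_instance
def pvWitness_gen_subtraction_perms : List (List Int) × Int := ([[1, 2], [0, 1]], 1)

def Spec_gen_subtraction_perms (dom_list : List (List Int)) (target : Int) (out : List (List Int)) : Prop := out = gen_subtraction_perms_alt dom_list target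
instance (dom_list : List (List Int)) (target : Int) (out : List (List Int)) : Decidable (Spec_gen_subtraction_perms dom_list target out) := by unfold Spec_gen_subtraction_perms; infer_instance

-- ===== CLAIM (what is proved, stated in full; the proofs are below) =====
def Claim_equal_gen_subtraction_perms : Prop := ∀ (dom_list : List (List Int)) (target : Int), Dom_gen_subtraction_perms dom_list target → Pre_gen_subtraction_perms dom_list target → Spec_gen_subtraction_perms dom_list target (gen_subtraction_perms dom_list target)

-- ===== LEMMAS AND PROOFS =====

-- canonical Cartesian product, used only in the proofs
def pvProd : List (List Int) → List (List Int)
  | [] => [[]]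
  | d :: rest => d.flatMap (fun i => (pvProd rest).map (i :: ·))

lemma foldl_step_eq_prod (l : List (List Int)) (A : List (List Int)) :
    l.foldl (fun prods dom => prods.flatMap (fun p => dom.map (fun v => p ++ [v]))) A
      = A.flatMap (fun p => (pvProd l).map (p ++ ·)) := by
  induction l generalizing A with
  | nil => simp [pvProd]
  | cons d rest ih =>
      simp only [List.foldl_cons, ih, pvProd]
      simp [List.flatMap_assoc, List.map_flatMap, List.flatMap_map, Function.comp_def]

lemma recHelper_eq_prod (l : List (List Int)) (h : l ≠ []) :
    pvRecHelper l = pvProd l := by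
  induction l with
  | nil => exact absurd rfl h
  | cons d rest ih =>
      cases rest with
      | nil =>
          simp [pvRecHelper, pvProd, List.flatMap_def]
      | cons e rs =>
          rw [show pvRecHelper (d :: e :: rs)
                = d.foldl (fun acc i =>
                    (pvRecHelper (e :: rs)).foldl (fun acc2 rr => acc2 ++ [i :: rr]) acc) []
              from rfl,
             ih (by simp)]
          simp only [PySem.List.foldl_append_singleton_eq_map,
            PySem.List.foldl_append_eq_flatMap, List.nil_append]
          rfl

lemma whileA_eq_any (p : List Int) (t : Int) (q : List Int) :
    pvWhileA p t q = q.any (fun x => 2 * x - p.sum == t) := by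
  induction q with
  | nil => simp [pvWhileA]
  | cons x xs ih =>
      simp only [pvWhileA, ih, List.any_cons]
      by_cases h : x - (p.sum - x) = t
      · simp [h, show (2 : Int) * x - p.sum = t by omega]
      · simp [beq_iff_eq, h, show ¬ ((2 : Int) * x - p.sum = t) by omega]

-- ===== VERDICT (by name: the statement is the Claim_ definition above) =====
theorem gen_subtraction_perms_spec : Claim_equal_gen_subtraction_perms := by
  intro dom_list target _hdom hpre
  unfold Spec_gen_subtraction_perms gen_subtraction_perms gen_subtraction_perms_alt
  rw [PySem.List.foldl_append_if_eq_filter, foldl_step_eq_prod,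
      recHelper_eq_prod dom_list hpre]
  simp only [List.flatMap_cons, List.flatMap_nil, List.append_nil, List.nil_append,
    List.map_id']
  exact List.filter_congr (fun p _ => by rw [whileA_eq_any]; rfl)
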